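-- pv_equiv track=rewrite | github.com/jcolinpatrick/kryptos | scripts/e_s_94_keystream_structure.py | check_period
-- ===== SOURCE A (Python) =====
-- def check_period(keystream, p):
--     """Check period-p consistency."""
--     residue_vals = {}
--     for pos, kval in keystream:
--         r = pos % p
--         if r in residue_vals:
--             if residue_vals[r] != kval:
--                 return False
--         else:
--             residue_vals[r] = kval
--     return True
-- ===== SOURCE B (Python) =====
-- def check_period(keystream, p):
--     """Check period-p consistency: sort residue-tagged entries, then scan adjacent pairs."""
--     tagged = sorted(((pos % p, kval) for pos, kval in keystream), key=lambda t: t[0])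
--     return all(a[0] != b[0] or a[1] == b[1] for a, b in zip(tagged, tagged[1:]))
-- ===== Notes on version B (the rewrite author's own statement) =====
-- stated objective: alternative
-- what changed: Replaces A's single dict-based early-exit scan with a sort-then-scan algorithm: tag every entry with its residue pos % p, stably sort by residue so equal residues become adjacent, then check each adjacent pair for a value conflict.
import Mathlib
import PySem

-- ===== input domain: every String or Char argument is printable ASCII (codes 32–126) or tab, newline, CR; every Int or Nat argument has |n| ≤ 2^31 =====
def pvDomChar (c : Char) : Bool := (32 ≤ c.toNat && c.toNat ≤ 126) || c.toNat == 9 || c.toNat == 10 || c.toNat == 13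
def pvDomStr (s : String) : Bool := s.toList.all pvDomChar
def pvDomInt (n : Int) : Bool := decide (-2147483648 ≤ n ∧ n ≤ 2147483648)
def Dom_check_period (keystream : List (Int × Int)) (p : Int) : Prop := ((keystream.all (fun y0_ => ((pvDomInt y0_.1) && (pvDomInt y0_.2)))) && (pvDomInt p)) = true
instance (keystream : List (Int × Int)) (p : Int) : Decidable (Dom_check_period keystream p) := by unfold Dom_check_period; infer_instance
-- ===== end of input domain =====

-- B replaces A's dict-based early-exit scan with a sort-by-residue-then-adjacent-scan algorithm ("alternative", same result, O(n log n)).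
-- Pre_ excludes nonempty keystreams with p = 0, where both Pythons raise ZeroDivisionError.


-- ===== PORT A =====
-- A's for-loop: dict residue_vals as accumulator, early return False on a mismatch
def check_period_go (p : Int) (d : PySem.Dict Int Int) : List (Int × Int) → Bool
  | [] => true
  | (pos, kval) :: rest =>
      let r := PySem.Int.mod pos p
      if d.contains r then
        if d.getD r 0 ≠ kval then false
        else check_period_go p d rest
      else check_period_go p (d.insert r kval) rest

def check_period (keystream : List (Int × Int)) (p : Int) : Bool :=
  check_period_go p PySem.Dict.empty keystream

-- ===== PORT B =====
def check_period_alt (keystream : List (Int × Int)) (p : Int) : Bool :=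
  -- tagged = sorted(((pos % p, kval) for pos, kval in keystream), key=lambda t: t[0])
  let tagged := PySem.List.sorted (keystream.map (fun pk => (PySem.Int.mod pk.1 p, pk.2))) (fun t => t.1) false
  -- all(a[0] != b[0] or a[1] == b[1] for a, b in zip(tagged, tagged[1:]))   (tagged[1:] = drop 1, exact here)
  (tagged.zip (tagged.drop 1)).all (fun ab => decide (ab.1.1 ≠ ab.2.1) || decide (ab.1.2 = ab.2.2))

-- ===== PRECONDITION & SPEC =====
-- Pre_ excludes exactly nonempty keystreams with p = 0, where A raises ZeroDivisionError (pos % 0).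
def Pre_check_period (keystream : List (Int × Int)) (p : Int) : Prop := p ≠ 0 ∨ keystream = []
instance (keystream : List (Int × Int)) (p : Int) : Decidable (Pre_check_period keystream p) := by unfold Pre_check_period; infer_instance
def pvWitness_check_period : (List (Int × Int)) × Int := ([(0, 1), (2, 1), (5, 3)], 2)

def Spec_check_period (keystream : List (Int × Int)) (p : Int) (out : Bool) : Prop := out = check_period_alt keystream p
instance (keystream : List (Int × Int)) (p : Int) (out : Bool) : Decidable (Spec_check_period keystream p out) := by unfold Spec_check_period; infer_instance

-- ===== CLAIM (what is proved, stated in full; the proofs are below) =====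
def Claim_equal_check_period : Prop := ∀ (keystream : List (Int × Int)) (p : Int), Dom_check_period keystream p → Pre_check_period keystream p → Spec_check_period keystream p (check_period keystream p)

-- ===== LEMMAS AND PROOFS =====

-- the residue-tagged keystream
def cpTag (p : Int) (ks : List (Int × Int)) : List (Int × Int) :=
  ks.map (fun pk => (PySem.Int.mod pk.1 p, pk.2))

-- "period-consistent": any two entries with the same residue carry the same value
def cpCons (l : List (Int × Int)) : Prop := ∀ a ∈ l, ∀ b ∈ l, a.1 = b.1 → a.2 = b.2

lemma cpCons_cons {a : Int × Int} {m : List (Int × Int)} :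
    cpCons (a :: m) ↔ (∀ c ∈ m, a.1 = c.1 → a.2 = c.2) ∧ cpCons m := by
  unfold cpCons
  simp only [List.mem_cons]
  constructor
  · intro h
    exact ⟨fun c hc => h a (Or.inl rfl) c (Or.inr hc), fun x hx y hy => h x (Or.inr hx) y (Or.inr hy)⟩
  · rintro ⟨ha, hm⟩ x hx y hy hxy
    rcases hx with rfl | hx <;> rcases hy with rfl | hy
    · rfl
    · exact ha y hy hxy
    · exact (ha x hx hxy.symm).symm
    · exact hm x hx y hy hxy

lemma cpCons_middle_mem {x : Int × Int} {s t : List (Int × Int)} (hx : x ∈ s) :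
    cpCons (s ++ x :: t) ↔ cpCons (s ++ t) := by
  constructor
  · intro h a ha b hb hab
    refine h a ?_ b ?_ hab <;>
      simp only [List.mem_append, List.mem_cons] at * <;> tauto
  · intro h a ha b hb hab
    have mem : ∀ c : Int × Int, c ∈ s ++ x :: t → c = x ∨ c ∈ s ++ t := by
      intro c hc
      simp only [List.mem_append, List.mem_cons] at hc ⊢; tauto
    have hx' : x ∈ s ++ t := List.mem_append_left _ hx
    rcases mem a ha with rfl | ha' <;> rcases mem b hb with rfl | hb'
    · rfl
    · exact h a hx' b hb' hab
    · exact h a ha' b hx' hab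
    · exact h a ha' b hb' hab

-- A's loop returns True exactly when the dict's items together with the remaining tagged entries are consistent
lemma cpA (p : Int) : ∀ (l : List (Int × Int)) (d : PySem.Dict Int Int), d.keys.Nodup →
    (check_period_go p d l = true ↔ cpCons (d.items ++ cpTag p l)) := by
  intro l
  induction l with
  | nil =>
    intro d hnd
    simp only [check_period_go, cpTag, List.map_nil, List.append_nil, true_iff]
    intro a ha b hb hab
    have : a = b := by
      have hnd' : (d.items.map (·.1)).Nodup := hnd
      exact List.inj_on_of_nodup_map hnd' ha hb hab
    rw [this]
  | cons pk rest ih =>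
    intro d hnd
    obtain ⟨pos, kval⟩ := pk
    simp only [check_period_go, cpTag, List.map_cons]
    by_cases hc : d.contains (PySem.Int.mod pos p) = true
    · rw [if_pos hc]
      obtain ⟨v, hv⟩ : ∃ v, d.get? (PySem.Int.mod pos p) = some v := by
        rw [PySem.Dict.contains_eq_isSome_get?] at hc
        exact Option.isSome_iff_exists.1 hc
      have hgd : d.getD (PySem.Int.mod pos p) 0 = v := PySem.Dict.getD_of_get?_eq_some d 0 hv
      have hmem : (PySem.Int.mod pos p, v) ∈ d.items := PySem.Dict.mem_items_of_get?_eq_some d hv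
      by_cases hne : v ≠ kval
      · rw [hgd, if_pos hne]
        simp only [Bool.false_eq_true, false_iff]
        intro h
        exact hne (h (PySem.Int.mod pos p, v) (List.mem_append_left _ hmem)
          (PySem.Int.mod pos p, kval) (by simp) rfl)
      · rw [hgd, if_neg hne]
        rw [not_not] at hne
        subst hne
        rw [ih d hnd, cpCons_middle_mem hmem]
        rfl
    · rw [if_neg hc]
      rw [Bool.not_eq_true] at hc
      rw [ih (d.insert (PySem.Int.mod pos p) kval) (PySem.Dict.nodup_keys_insert _ _ _ hnd)]
      rw [PySem.Dict.items_insert_of_not_contains d _ hc]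
      rw [List.append_assoc]
      rfl

-- B's adjacent scan on a list whose residues are nondecreasing decides consistency
lemma cpB : ∀ (l : List (Int × Int)), l.Pairwise (fun a b => a.1 ≤ b.1) →
    ((l.zip (l.drop 1)).all (fun ab => decide (ab.1.1 ≠ ab.2.1) || decide (ab.1.2 = ab.2.2)) = true
      ↔ cpCons l) := by
  intro l
  induction l with
  | nil => intro _; simp [cpCons]
  | cons a m ih =>
    intro hp
    rw [List.pairwise_cons] at hp
    obtain ⟨hale, hpm⟩ := hp
    cases m with
    | nil =>
      simp only [List.drop, List.zip_nil_right, List.all_nil, true_iff]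
      intro x hx y hy hxy
      simp only [List.mem_singleton] at hx hy
      rw [hx, hy]
    | cons b t =>
      have hbt := ih hpm
      simp only [List.drop, List.zip_cons_cons, List.all_cons, Bool.and_eq_true] at hbt ⊢
      rw [cpCons_cons (a := a)]
      constructor
      · rintro ⟨hR, hrest⟩
        have hcons : cpCons (b :: t) := hbt.1 hrest
        refine ⟨?_, hcons⟩
        intro c hc hac
        rcases List.mem_cons.1 hc with rfl | hc'
        · simp only [Bool.or_eq_true, decide_eq_true_eq] at hR
          rcases hR with h | h
          · exact absurd hac h
          · exact h
        · -- c ∈ t; sortedness forces b.1 = a.1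
          have h1 : a.1 ≤ b.1 := hale b (by simp)
          have h2 : b.1 ≤ c.1 := (List.pairwise_cons.1 hpm).1 c hc'
          have hab : a.1 = b.1 := by omega
          simp only [Bool.or_eq_true, decide_eq_true_eq] at hR
          have hab2 : a.2 = b.2 := by
            rcases hR with h | h
            · exact absurd hab h
            · exact h
          have : b.2 = c.2 := hcons b (by simp) c (by simp [hc']) (by omega)
          omega
      · rintro ⟨ha, hcons⟩
        refine ⟨?_, hbt.2 hcons⟩
        by_cases hab : a.1 = b.1
        · simp [ha b (by simp) hab]
        · simp [hab]

-- cpCons only looks at membership, so it transfers along a permutation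
lemma cpCons_of_perm {l l' : List (Int × Int)} (hperm : l.Perm l') :
    cpCons l ↔ cpCons l' := by
  constructor <;> intro h a ha b hb hab
  · exact h a (hperm.mem_iff.2 ha) b (hperm.mem_iff.2 hb) hab
  · exact h a (hperm.mem_iff.1 ha) b (hperm.mem_iff.1 hb) hab

-- ===== VERDICT (by name: the statement is the Claim_ definition above) =====
theorem check_period_spec : Claim_equal_check_period := by
  intro ks p _ _
  unfold Spec_check_period check_period check_period_alt
  have hA : check_period_go p PySem.Dict.empty ks = true ↔ cpCons (cpTag p ks) := by
    simpa using cpA p ks PySem.Dict.empty (by simp)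
  have hperm := PySem.List.sorted_perm
    (xs := ks.map (fun pk => (PySem.Int.mod pk.1 p, pk.2))) (key := fun t => t.1) (rev := false)
  have hB := cpB (PySem.List.sorted (ks.map (fun pk => (PySem.Int.mod pk.1 p, pk.2))) (fun t => t.1) false)
    (PySem.List.sorted_pairwise _ _)
  rw [cpCons_of_perm hperm] at hB
  have : cpCons (cpTag p ks) ↔ cpCons (ks.map (fun pk => (PySem.Int.mod pk.1 p, pk.2))) := Iff.rfl
  rw [this] at hA
  by_cases h : cpCons (ks.map (fun pk => (PySem.Int.mod pk.1 p, pk.2)))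
  · rw [hA.2 h, hB.2 h]
  · have h1 := fun hh => h (hA.1 hh)
    have h2 := fun hh => h (hB.1 hh)
    rw [Bool.eq_false_iff.2 h1, Bool.eq_false_iff.2 h2]
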